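-- pv_equiv track=rewrite | github.com/S-VIN/education | geekbrains/python/lesson4/2.py | erSimple
-- ===== SOURCE A (Python) =====
-- def erSimple(n):
--     k = 1000
--     if n == 1: return 1
--     mas = makeMas(k)
--     while(len(mas) < n):
--         k *= 2
--         mas = makeMas(k)
--     return mas[n - 2]
--
-- def makeMas(n):
--     sieve = [i for i in range(n)]
--     sieve[1] = 0
--     for i in range(2, n):
--         if sieve[i] != 0:
--             j = i * 2
--             while j < n:
--                 sieve[j] = 0
--                 j += i
--     result = [i for i in sieve if i != 0]
--     return result
-- ===== SOURCE B (Python) =====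
-- def erSimple(n):
--     if n == 1:
--         return 1
--     primes = []
--     c = 2
--     while len(primes) < n - 1:
--         if isPrime(c, primes):
--             primes.append(c)
--         c += 1
--     return primes[-1]
--
-- def isPrime(c, primes):
--     for p in primes:
--         if p * p > c:
--             return True
--         if c % p == 0:
--             return False
--     return True
-- ===== Notes on version B (the rewrite author's own statement) =====
-- stated objective: simpler
-- what changed: Replaced the sieve-of-Eratosthenes-with-bound-doubling by an incremental loop that tests each candidate by trial division against the primes found so far and collects exactly the first n-1 primes, returning the last one.
-- outside the precondition, e.g. on erSimple(0): A returns 991, B raises IndexError; on erSimple(-1): A returns 983, B raises IndexError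
import Mathlib
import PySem

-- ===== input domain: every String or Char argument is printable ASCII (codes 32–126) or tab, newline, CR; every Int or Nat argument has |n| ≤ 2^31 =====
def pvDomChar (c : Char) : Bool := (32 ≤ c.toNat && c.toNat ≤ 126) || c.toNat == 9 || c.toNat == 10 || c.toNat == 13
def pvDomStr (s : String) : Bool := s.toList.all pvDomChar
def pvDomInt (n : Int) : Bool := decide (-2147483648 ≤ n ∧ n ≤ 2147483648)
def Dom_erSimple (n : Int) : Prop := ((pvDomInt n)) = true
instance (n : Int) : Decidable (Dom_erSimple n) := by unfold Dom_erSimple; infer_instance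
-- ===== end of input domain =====

-- B replaces the doubling Eratosthenes sieve by an incremental trial-division loop
-- collecting exactly the first n-1 primes (objective: simpler; not faster).

-- ===== PORT A =====
-- inner while loop of makeMas: zero out sieve[j], sieve[j+i], …  while j < N
-- (the '0 < i' conjunct only makes the recursion total; every call has i ≥ 2)
def pvZmul (s : Array Nat) (i j N : Nat) : Array Nat :=
  if _h : j < N ∧ 0 < i then pvZmul (s.setIfInBounds j 0) i (j + i) N else s
termination_by N - j
decreasing_by omega

-- body of the 'for i in range(2, n)' loop
def pvStep (N : Nat) (s : Array Nat) (i : Nat) : Array Nat :=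
  if s.getD i 0 ≠ 0 then pvZmul s i (i * 2) N else s

def makeMas (N : Nat) : List Nat :=
  let s0 := (Array.range N).setIfInBounds 1 0
  let s := (List.range' 2 (N - 2)).foldl (pvStep N) s0
  s.toList.filter (· != 0)

-- 'while len(mas) < n: k *= 2; mas = makeMas(k)', with fuel that only makes it
-- total (fuel n.toNat is proved sufficient below); 'mas[n - 2]' via pyGet?
def pvLoopA (fuel k : Nat) (n : Int) : Int :=
  let mas := makeMas k
  if (mas.length : Int) < n then
    match fuel with
    | 0 => 0
    | f + 1 => pvLoopA f (k * 2) n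
  else (PySem.List.pyGet? (mas.map (Int.ofNat)) (n - 2)).getD 0

def erSimple (n : Int) : Int :=
  if n = 1 then 1 else pvLoopA n.toNat 1000 n

-- ===== PORT B =====
-- 'for p in primes: if p * p > c: return True; if c % p == 0: return False; return True'
def pvIsPr (c : Nat) (primes : List Nat) : Bool :=
  match primes with
  | [] => true
  | p :: rest =>
    if p * p > c then true
    else if c % p = 0 then false
    else pvIsPr c rest

-- 'while len(primes) < n - 1: if isPrime(c): primes.append(c); c += 1',
-- with fuel that only makes it total (2 ^ n.toNat is proved sufficient below);
-- 'primes[-1]' via pyGet?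
def pvLoopB (fuel : Nat) (primes : List Nat) (c : Nat) (n : Int) : Int :=
  if (primes.length : Int) < n - 1 then
    match fuel with
    | 0 => 0
    | f + 1 => pvLoopB f (if pvIsPr c primes then primes ++ [c] else primes) (c + 1) n
  else (PySem.List.pyGet? (primes.map (Int.ofNat)) (-1)).getD 0

def erSimple_alt (n : Int) : Int :=
  if n = 1 then 1 else pvLoopB (2 ^ n.toNat) [] 2 n

-- ===== PRECONDITION & SPEC =====
-- Pre_ excludes n ≤ 0, where A's 'mas[n-2]' wraps around and returns a prime from
-- the end of its initial sieve (an accident of negative indexing), or, for very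
-- negative n, raises IndexError; B raises IndexError on all n ≤ 0.
def Pre_erSimple (n : Int) : Prop := 1 ≤ n
instance (n : Int) : Decidable (Pre_erSimple n) := by unfold Pre_erSimple; infer_instance
def pvWitness_erSimple : Int := 5

def Spec_erSimple (n : Int) (out : Int) : Prop := out = erSimple_alt n
instance (n : Int) (out : Int) : Decidable (Spec_erSimple n out) := by unfold Spec_erSimple; infer_instance

-- ===== CLAIM (what is proved, stated in full; the proofs are below) =====
def Claim_equal_erSimple : Prop := ∀ (n : Int), Dom_erSimple n → Pre_erSimple n → Spec_erSimple n (erSimple n)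

-- ===== LEMMAS AND PROOFS =====

theorem pvZmul_size (s : Array Nat) (i j N : Nat) : (pvZmul s i j N).size = s.size := by
  fun_induction pvZmul with
  | case1 s j h ih => rw [ih]; simp
  | case2 => rfl

theorem pvZmul_getD_untouched (s : Array Nat) (i j N m : Nat) :
    i ∣ j → (i ∣ m → m < j) → (pvZmul s i j N).getD m 0 = s.getD m 0 := by
  fun_induction pvZmul with
  | case1 s j h ih =>
    intro hij hm
    have hmj : m ≠ j := by
      intro hh; subst hh
      exact absurd (hm hij) (lt_irrefl _)
    rw [ih (dvd_add hij dvd_rfl) (fun h' => Nat.lt_add_right _ (hm h'))]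
    rw [Array.getD_eq_getD_getElem?, Array.getD_eq_getD_getElem?,
      Array.getElem?_setIfInBounds_ne (Ne.symm hmj)]
  | case2 => intro _ _; rfl

theorem pvZmul_getD_zero (s : Array Nat) (i j N m : Nat) :
    s.getD m 0 = 0 → (pvZmul s i j N).getD m 0 = 0 := by
  fun_induction pvZmul with
  | case1 s j h ih =>
    intro hs
    apply ih
    by_cases hmj : m = j
    · subst hmj
      by_cases hlen : m < s.size
      · simp [Array.getD_eq_getD_getElem?, Array.getElem?_setIfInBounds_self_of_lt hlen]
      · rw [Array.setIfInBounds, dif_neg (by omega)]; exact hs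
    · rw [Array.getD_eq_getD_getElem?, Array.getElem?_setIfInBounds_ne (Ne.symm hmj),
        ← Array.getD_eq_getD_getElem?]
      exact hs
  | case2 => exact id

theorem pvZmul_getD_kill (s : Array Nat) (i j N m : Nat) :
    N ≤ s.size → 0 < i → i ∣ j → i ∣ m → j ≤ m → m < N → (pvZmul s i j N).getD m 0 = 0 := by
  fun_induction pvZmul with
  | case1 s j h ih =>
    by_cases hmj : m = j
    · intro hlen hi hij him hjm hmN
      subst hmj
      apply pvZmul_getD_zero
      simp [Array.getD_eq_getD_getElem?,
        Array.getElem?_setIfInBounds_self_of_lt (show m < s.size by omega)]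
    · intro hlen hi hij him hjm hmN
      have hsub : i ∣ m - j := Nat.dvd_sub him hij
      have hlt : j < m := lt_of_le_of_ne hjm (fun h' => hmj h'.symm)
      have : i ≤ m - j := Nat.le_of_dvd (by omega) hsub
      exact ih (by simpa using hlen) hi (dvd_add hij dvd_rfl) him (by omega) hmN
  | case2 s j h =>
    intro hlen hi hij him hjm hmN
    exact absurd ⟨by omega, hi⟩ h

-- the sieve invariant after processing all indices below `bound`
def SieveInv (N bound : Nat) (s : Array Nat) : Prop :=
  s.size = N ∧
  (∀ m, m < N → Nat.Prime m → s.getD m 0 = m) ∧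
  (∀ m, m < N → ¬ Nat.Prime m → (m < 2 ∨ m.minFac < bound) → s.getD m 0 = 0)

theorem sieveInv_init (N : Nat) : SieveInv N 2 ((Array.range N).setIfInBounds 1 0) := by
  have hlen : ((Array.range N).setIfInBounds 1 0).size = N := by simp
  refine ⟨hlen, ?_, ?_⟩
  · intro m hm hp
    have h1 : m ≠ 1 := by
      intro h; rw [h] at hp; exact Nat.not_prime_one hp
    rw [Array.getD_eq_getD_getElem?, Array.getElem?_setIfInBounds_ne (Ne.symm h1),
      Array.getElem?_range]
    simp [hm]
  · intro m hm hp hcase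
    have hm2 : m < 2 := by
      rcases hcase with h | h
      · exact h
      · by_contra hge
        have := (Nat.minFac_prime (by omega : m ≠ 1)).two_le
        omega
    rw [Array.getD_eq_getD_getElem?]
    interval_cases m
    · rw [Array.getElem?_setIfInBounds_ne (by omega), Array.getElem?_range]
      simp [hm]
    · rw [Array.getElem?_setIfInBounds_self_of_lt (by simpa using hm), Option.getD_some]

theorem sieveInv_step (N i : Nat) (hi : 2 ≤ i) (hiN : i < N) (s : Array Nat) :
    SieveInv N i s → SieveInv N (i + 1) (pvStep N s i) := by
  rintro ⟨hlen, hprime, hcomp⟩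
  by_cases hip : Nat.Prime i
  · have hsi : s.getD i 0 = i := hprime i hiN hip
    have hne : s.getD i 0 ≠ 0 := by omega
    refine ⟨?_, ?_, ?_⟩
    · rw [pvStep, if_pos hne, pvZmul_size]; exact hlen
    · intro m hm hp
      rw [pvStep, if_pos hne, pvZmul_getD_untouched s i (i * 2) N m ⟨2, by ring⟩ ?_]
      · exact hprime m hm hp
      · intro hdvd
        have := (Nat.prime_dvd_prime_iff_eq hip hp).mp hdvd
        omega
    · intro m hm hp hcase
      rw [pvStep, if_pos hne]
      rcases hcase with h | h
      · exact pvZmul_getD_zero _ _ _ _ _ (hcomp m hm hp (Or.inl h))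
      · rcases Nat.lt_or_ge m.minFac i with h' | h'
        · exact pvZmul_getD_zero _ _ _ _ _ (hcomp m hm hp (Or.inr h'))
        · rcases Nat.lt_or_ge m 2 with hm2 | hm2
          · exact pvZmul_getD_zero _ _ _ _ _ (hcomp m hm hp (Or.inl hm2))
          -- minFac m = i : m is a proper multiple of i, killed now
          have hfac : m.minFac = i := by omega
          have hdvd : i ∣ m := hfac ▸ Nat.minFac_dvd m
          have hmi : m ≠ i := by
            intro h''; exact hp (h'' ▸ hip)
          obtain ⟨t, rfl⟩ := hdvd
          have ht : 2 ≤ t := by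
            rcases t with _ | _ | t
            · omega
            · omega
            · omega
          exact pvZmul_getD_kill s i (i * 2) N (i * t) (by omega) (by omega)
            ⟨2, by ring⟩ ⟨t, rfl⟩ (by nlinarith) hm
  · -- i composite: sieve[i] = 0, so this step is a no-op
    have hi0 : s.getD i 0 = 0 := by
      apply hcomp i hiN hip
      right
      have h1 : i.minFac ≠ i := fun h =>
        hip ((Nat.prime_def_minFac.mpr ⟨hi, h⟩))
      have := Nat.minFac_le (show 0 < i by omega)
      omega
    have hstep : pvStep N s i = s := by rw [pvStep, if_neg (not_not_intro hi0)]
    rw [hstep]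
    refine ⟨hlen, hprime, ?_⟩
    intro m hm hp hcase
    apply hcomp m hm hp
    rcases hcase with h | h
    · exact Or.inl h
    · rcases Nat.lt_or_ge m.minFac i with h' | h'
      · exact Or.inr h'
      · rcases Nat.lt_or_ge m 2 with hm2 | hm2
        · exact Or.inl hm2
        · exfalso
          have hfac : m.minFac = i := by omega
          exact hip (hfac ▸ Nat.minFac_prime (by omega : m ≠ 1))

theorem sieveInv_fold (N : Nat) : ∀ (len a : Nat) (s : Array Nat), 2 ≤ a → a + len ≤ N →
    SieveInv N a s → SieveInv N (a + len) ((List.range' a len).foldl (pvStep N) s) := by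
  intro len
  induction len with
  | zero => intro a s _ _ h; simpa using h
  | succ l ih =>
    intro a s ha haN hinv
    rw [List.range'_succ, List.foldl_cons]
    have := ih (a + 1) (pvStep N s a) (by omega) (by omega)
      (sieveInv_step N a ha (by omega) s hinv)
    simpa [show a + 1 + l = a + (l + 1) by omega] using this

theorem sieve_final (N : Nat) :
    SieveInv N N ((List.range' 2 (N - 2)).foldl (pvStep N) ((Array.range N).setIfInBounds 1 0)) := by
  rcases Nat.lt_or_ge N 2 with hN | hN
  · -- N < 2 : the range is empty, and the invariant at bound 2 is at least as strong
    have h2 : N - 2 = 0 := by omega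
    rw [h2]
    obtain ⟨h1, h2', h3⟩ := sieveInv_init N
    exact ⟨by simpa using h1, h2', fun m hm hp _ => h3 m hm hp (Or.inl (by omega))⟩
  · have := sieveInv_fold N (N - 2) 2 ((Array.range N).setIfInBounds 1 0) le_rfl (by omega)
      (sieveInv_init N)
    simpa [show 2 + (N - 2) = N by omega] using this

theorem makeMas_eq_filter (N : Nat) :
    makeMas N = (List.range N).filter (fun m => decide (Nat.Prime m)) := by
  obtain ⟨hlen, hprime, hcomp⟩ := sieve_final N
  show ((List.range' 2 (N - 2)).foldl (pvStep N) ((Array.range N).setIfInBounds 1 0)).toList.filter (· != 0) =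
    (List.range N).filter (fun m => decide (Nat.Prime m))
  have hs : ((List.range' 2 (N - 2)).foldl (pvStep N) ((Array.range N).setIfInBounds 1 0)).toList =
      (List.range N).map (fun m => if Nat.Prime m then m else 0) := by
    apply List.ext_getElem
    · simp [hlen]
    · intro m h1 h2
      have hmN : m < N := by simpa using h2
      rw [Array.getElem_toList]
      have hget : ∀ v, ((List.range' 2 (N - 2)).foldl (pvStep N) ((Array.range N).setIfInBounds 1 0)).getD m 0 = v →
          ((List.range' 2 (N - 2)).foldl (pvStep N) ((Array.range N).setIfInBounds 1 0))[m]'(by simpa using h1) = v := by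
        intro v hv
        rwa [Array.getD_eq_getD_getElem?, Array.getElem?_eq_getElem (by simpa using h1), Option.getD_some] at hv
      by_cases hp : Nat.Prime m
      · rw [hget m (hprime m hmN hp)]
        simp [hp, hmN]
      · rw [hget 0 (hcomp m hmN hp (by
          rcases Nat.lt_or_ge m 2 with h | h
          · exact Or.inl h
          · right
            have h1' : m.minFac ≠ m := fun h' => hp (Nat.prime_def_minFac.mpr ⟨h, h'⟩)
            have := Nat.minFac_le (show 0 < m by omega)
            omega))]
        simp [hp, hmN]
  rw [hs]
  -- filtering the 0-marked list is filtering range by primality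
  have : ∀ l : List Nat,
      (l.map (fun m => if Nat.Prime m then m else 0)).filter (· != 0) =
      l.filter (fun m => decide (Nat.Prime m)) := by
    intro l
    induction l with
    | nil => rfl
    | cons a t iht =>
      by_cases hp : Nat.Prime a
      · have ha : a ≠ 0 := by have := hp.two_le; omega
        simp [hp, iht, ha]
      · simp [hp, iht]
  exact this (List.range N)

theorem filter_range_eq_map_nth (N : Nat) :
    (List.range N).filter (fun m => decide (Nat.Prime m)) =
    (List.range (Nat.count Nat.Prime N)).map (Nat.nth Nat.Prime) := by
  induction N with
  | zero => simp [Nat.count_zero]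
  | succ N ih =>
    rw [List.range_succ, List.filter_append, ih, Nat.count_succ]
    by_cases hp : Nat.Prime N
    · simp [hp, List.range_succ, Nat.nth_count hp]
    · simp [hp]

theorem makeMas_eq (N : Nat) :
    makeMas N = (List.range (Nat.count Nat.Prime N)).map (Nat.nth Nat.Prime) := by
  rw [makeMas_eq_filter, filter_range_eq_map_nth]

-- Bertrand: the i-th prime is at most 2^(i+1)
theorem nth_prime_le (i : Nat) : Nat.nth Nat.Prime i ≤ 2 ^ (i + 1) := by
  induction i with
  | zero =>
    have hc : Nat.count Nat.Prime 2 = 0 := by decide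
    have h2 : Nat.Prime 2 := by norm_num
    have := Nat.nth_count h2
    rw [hc] at this
    simp [this]
  | succ i ih =>
    have hinf := Nat.infinite_setOf_prime
    have hpos : Nat.nth Nat.Prime i ≠ 0 :=
      (Nat.nth_mem_of_infinite hinf i).pos.ne'
    obtain ⟨q, hq, hlt, hle⟩ := Nat.exists_prime_lt_and_le_two_mul _ hpos
    have hcount : i < Nat.count Nat.Prime q := (Nat.lt_nth_iff_count_lt hinf).mpr hlt
    have hnthle : Nat.nth Nat.Prime (i + 1) ≤ Nat.nth Nat.Prime (Nat.count Nat.Prime q) :=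
      Nat.nth_monotone hinf hcount
    rw [Nat.nth_count hq] at hnthle
    calc Nat.nth Nat.Prime (i + 1) ≤ q := hnthle
      _ ≤ 2 * Nat.nth Nat.Prime i := hle
      _ ≤ 2 * 2 ^ (i + 1) := by omega
      _ = 2 ^ (i + 2) := by ring

theorem count_ge_of_nth_lt {t k : Nat} (h : Nat.nth Nat.Prime t < k) :
    t + 1 ≤ Nat.count Nat.Prime k :=
  (Nat.lt_nth_iff_count_lt Nat.infinite_setOf_prime).mpr h

theorem pvLoopA_eq (n : Int) (hn : 2 ≤ n) :
    ∀ (f k : Nat), (n : Int) ≤ (Nat.count Nat.Prime (k * 2 ^ f) : Int) →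
    pvLoopA f k n = (Nat.nth Nat.Prime (n.toNat - 2) : Int) := by
  intro f
  induction f with
  | zero =>
    intro k hk
    rw [pvLoopA]
    have hlen : (makeMas k).length = Nat.count Nat.Prime k := by
      rw [makeMas_eq]; simp
    rw [hlen]
    rw [if_neg (by simp at hk ⊢; omega)]
    have hidx : n.toNat - 2 < Nat.count Nat.Prime k := by
      simp at hk; omega
    have hcast : n - 2 = ((n.toNat - 2 : Nat) : Int) := by omega
    rw [hcast, PySem.List.pyGet?_natCast, makeMas_eq]
    simp [hidx]
  | succ f ihf =>
    intro k hk
    rw [pvLoopA]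
    have hlen : (makeMas k).length = Nat.count Nat.Prime k := by
      rw [makeMas_eq]; simp
    rw [hlen]
    by_cases hc : (Nat.count Nat.Prime k : Int) < n
    · rw [if_pos hc]
      exact ihf (k * 2) (by rw [show k * 2 * 2 ^ f = k * 2 ^ (f + 1) by ring]; exact hk)
    · rw [if_neg hc]
      have hidx : n.toNat - 2 < Nat.count Nat.Prime k := by
        simp at hc; omega
      have hcast : n - 2 = ((n.toNat - 2 : Nat) : Int) := by omega
      rw [hcast, PySem.List.pyGet?_natCast, makeMas_eq]
      simp [hidx]

theorem erSimple_eq_nth (n : Int) (hn : 2 ≤ n) :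
    erSimple n = (Nat.nth Nat.Prime (n.toNat - 2) : Int) := by
  rw [erSimple, if_neg (by omega)]
  apply pvLoopA_eq n hn
  have hb : Nat.nth Nat.Prime (n.toNat - 1) < 1000 * 2 ^ n.toNat := by
    have h1 := nth_prime_le (n.toNat - 1)
    have h2 : 2 ^ (n.toNat - 1 + 1) ≤ 2 ^ n.toNat :=
      Nat.pow_le_pow_right (by omega) (by omega)
    have h3 : 2 ^ n.toNat < 1000 * 2 ^ n.toNat := by
      have := Nat.one_le_two_pow (n := n.toNat)
      nlinarith
    omega
  have := count_ge_of_nth_lt hb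
  have hn' : n.toNat - 1 + 1 = n.toNat := by omega
  rw [hn'] at this
  omega

-- ===== B-side lemmas =====

theorem pvIsPr_true_of (c : Nat) (l : List Nat)
    (h : ∀ p, p ∈ l → p * p ≤ c → ¬ p ∣ c) : pvIsPr c l = true := by
  induction l with
  | nil => rfl
  | cons p rest ih =>
    rw [pvIsPr]
    by_cases hpp : p * p > c
    · rw [if_pos hpp]
    · rw [if_neg hpp, if_neg (fun hmod => h p (List.mem_cons_self) (by omega)
        (Nat.dvd_of_mod_eq_zero hmod))]
      exact ih (fun q hq => h q (List.mem_cons_of_mem _ hq))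

theorem pvIsPr_false_of (c : Nat) (l : List Nat) (hsorted : l.Sorted (· < ·))
    (q : Nat) (hq : q ∈ l) (hq0 : 0 < q) (hdvd : q ∣ c) (hqq : q * q ≤ c) :
    pvIsPr c l = false := by
  induction l with
  | nil => exact absurd hq (List.not_mem_nil)
  | cons p rest ih =>
    rw [pvIsPr]
    rcases List.mem_cons.mp hq with rfl | hq'
    · rw [if_neg (by omega), if_pos (Nat.mod_eq_zero_of_dvd hdvd)]
    · have hpq : p < q := (List.sorted_cons.mp hsorted).1 q hq'
      have hppc : ¬ p * p > c := by nlinarith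
      rw [if_neg hppc]
      by_cases hmod : c % p = 0
      · rw [if_pos hmod]
      · rw [if_neg hmod]
        exact ih (List.sorted_cons.mp hsorted).2 hq'

theorem mem_map_nth_iff (c p : Nat) :
    p ∈ (List.range (Nat.count Nat.Prime c)).map (Nat.nth Nat.Prime) ↔
      (Nat.Prime p ∧ p < c) := by
  have hinf := Nat.infinite_setOf_prime
  constructor
  · intro hp
    obtain ⟨i, hi, rfl⟩ := by simpa using hp
    exact ⟨Nat.nth_mem_of_infinite hinf i, (Nat.lt_nth_iff_count_lt hinf).mp hi⟩
  · rintro ⟨hp, hpc⟩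
    have h1 : Nat.nth Nat.Prime (Nat.count Nat.Prime p) = p := Nat.nth_count hp
    have h2 : Nat.count Nat.Prime p < Nat.count Nat.Prime c :=
      (Nat.lt_nth_iff_count_lt (p := Nat.Prime) hinf).mpr (by rw [h1]; exact hpc)
    simpa using ⟨Nat.count Nat.Prime p, h2, h1⟩

theorem sorted_map_nth (t : Nat) :
    ((List.range t).map (Nat.nth Nat.Prime)).Sorted (· < ·) := by
  have hinf := Nat.infinite_setOf_prime
  apply List.Pairwise.map
  · intro a b hab
    exact (Nat.nth_lt_nth hinf).mpr hab
  · exact List.pairwise_lt_range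

theorem pvIsPr_iff (c : Nat) (hc : 2 ≤ c) :
    pvIsPr c ((List.range (Nat.count Nat.Prime c)).map (Nat.nth Nat.Prime)) = true ↔
      Nat.Prime c := by
  constructor
  · intro h
    by_contra hp
    have hq := Nat.minFac_prime (by omega : c ≠ 1)
    have hqq : c.minFac * c.minFac ≤ c := by
      have := Nat.minFac_sq_le_self (by omega : 0 < c) hp
      nlinarith [(pow_two c.minFac) ▸ this]
    have hqc : c.minFac < c := by nlinarith [hq.two_le]
    have hmem : c.minFac ∈ (List.range (Nat.count Nat.Prime c)).map (Nat.nth Nat.Prime) :=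
      (mem_map_nth_iff c c.minFac).mpr ⟨hq, hqc⟩
    rw [pvIsPr_false_of c _ (sorted_map_nth _) c.minFac hmem hq.pos
      (Nat.minFac_dvd c) hqq] at h
    exact Bool.false_ne_true h
  · intro hp
    apply pvIsPr_true_of
    intro p hpmem hppc hdvd
    obtain ⟨hpp, hpc⟩ := (mem_map_nth_iff c p).mp hpmem
    have := (Nat.prime_dvd_prime_iff_eq hpp hp).mp hdvd
    omega

theorem pvLoopB_eq (n : Int) (hn : 2 ≤ n) :
    ∀ (f c : Nat), 2 ≤ c → Nat.count Nat.Prime c ≤ n.toNat - 1 →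
    n.toNat - 1 ≤ Nat.count Nat.Prime (c + f) →
    pvLoopB f ((List.range (Nat.count Nat.Prime c)).map (Nat.nth Nat.Prime)) c n =
      (Nat.nth Nat.Prime (n.toNat - 2) : Int) := by
  intro f
  induction f with
  | zero =>
    intro c hc hle hge
    simp only [Nat.add_zero] at hge
    have hcnt : Nat.count Nat.Prime c = n.toNat - 1 := by omega
    rw [pvLoopB, if_neg (by simp only [List.length_map, List.length_range]; omega)]
    have h1 : 1 ≤ n.toNat - 1 := by omega
    rw [PySem.List.pyGet?_neg_one]
    have hlist : ((List.range (Nat.count Nat.Prime c)).map (Nat.nth Nat.Prime)).map Int.ofNat =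
        (List.range (n.toNat - 1)).map (fun i => (Nat.nth Nat.Prime i : Int)) := by
      rw [hcnt, List.map_map]; rfl
    rw [hlist]
    have hr : n.toNat - 1 = (n.toNat - 2) + 1 := by omega
    rw [hr, List.range_succ]
    simp
  | succ f ihf =>
    intro c hc hle hge
    by_cases hcond : Nat.count Nat.Prime c < n.toNat - 1
    · rw [pvLoopB, if_pos (by simp only [List.length_map, List.length_range]; omega)]
      have hstep : (if pvIsPr c ((List.range (Nat.count Nat.Prime c)).map (Nat.nth Nat.Prime)) then
          ((List.range (Nat.count Nat.Prime c)).map (Nat.nth Nat.Prime)) ++ [c]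
          else ((List.range (Nat.count Nat.Prime c)).map (Nat.nth Nat.Prime))) =
          (List.range (Nat.count Nat.Prime (c + 1))).map (Nat.nth Nat.Prime) := by
        by_cases hp : Nat.Prime c
        · rw [if_pos ((pvIsPr_iff c hc).mpr hp), Nat.count_succ, if_pos hp,
            List.range_succ, List.map_append]
          simp [Nat.nth_count hp]
        · rw [if_neg (by simpa using (fun h => hp ((pvIsPr_iff c hc).mp h))),
            Nat.count_succ, if_neg hp]
          simp
      rw [hstep]
      have hnext : Nat.count Nat.Prime (c + 1) ≤ n.toNat - 1 := by
        rw [Nat.count_succ]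
        split <;> omega
      have := ihf (c + 1) (by omega) hnext (by rw [show c + 1 + f = c + (f + 1) by omega]; exact hge)
      exact this
    · -- already done: count = n - 1, same exit as the zero case
      have hcnt : Nat.count Nat.Prime c = n.toNat - 1 := by omega
      rw [pvLoopB, if_neg (by simp only [List.length_map, List.length_range]; omega)]
      rw [PySem.List.pyGet?_neg_one]
      have hlist : ((List.range (Nat.count Nat.Prime c)).map (Nat.nth Nat.Prime)).map Int.ofNat =
          (List.range (n.toNat - 1)).map (fun i => (Nat.nth Nat.Prime i : Int)) := by
        rw [hcnt, List.map_map]; rfl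
      rw [hlist]
      have hr : n.toNat - 1 = (n.toNat - 2) + 1 := by omega
      rw [hr, List.range_succ]
      simp

theorem erSimple_alt_eq_nth (n : Int) (hn : 2 ≤ n) :
    erSimple_alt n = (Nat.nth Nat.Prime (n.toNat - 2) : Int) := by
  rw [erSimple_alt, if_neg (by omega)]
  have hc2 : Nat.count Nat.Prime 2 = 0 := by decide
  have hstart : ([] : List Nat) = (List.range (Nat.count Nat.Prime 2)).map (Nat.nth Nat.Prime) := by
    rw [hc2]; rfl
  rw [hstart]
  apply pvLoopB_eq n hn _ 2 le_rfl (by omega)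
  have hb : Nat.nth Nat.Prime (n.toNat - 2) < 2 + 2 ^ n.toNat := by
    have h1 := nth_prime_le (n.toNat - 2)
    have h2 : 2 ^ (n.toNat - 2 + 1) ≤ 2 ^ n.toNat :=
      Nat.pow_le_pow_right (by omega) (by omega)
    omega
  have := count_ge_of_nth_lt hb
  omega

-- ===== VERDICT (by name: the statement is the Claim_ definition above) =====
theorem erSimple_spec : Claim_equal_erSimple := by
  intro n _hdom hpre
  unfold Spec_erSimple
  rcases eq_or_lt_of_le (show (1 : Int) ≤ n from hpre) with h1 | h2
  · rw [erSimple, erSimple_alt, if_pos h1.symm, if_pos h1.symm]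
  · rw [erSimple_eq_nth n (by omega), erSimple_alt_eq_nth n (by omega)]
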